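-- pv_equiv track=rewrite | github.com/itsliamegan/acsl | practice1/acsl.py | get_most_common_check_digits_in_range
-- ===== SOURCE A (Python) =====
-- from typing import List, Set
-- from collections import Counter
--
-- def get_check_digit(pin: int) -> int:
--     product_pairs = [
--         int(val) * (i + 2) for i, val in enumerate(list(str(pin))[::-1])
--     ]
--     sum_of_products = sum(product_pairs)
--
--     if sum_of_products == 17:
--         return -1
--
--     check_digit = sum_of_products % 123
--
--     if check_digit < 10:
--         return check_digit
--     else:
--         return get_check_digit(sum_of_products)
--
-- def get_check_digits_in_range(pin: int, pin_range: int) -> List[int]: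
--     check_digits_in_range = [
--         get_check_digit(pin + n) for n in range(pin_range + 1)
--     ]
--     check_digits_in_range_without_discards = [
--         n for n in check_digits_in_range if n != -1
--     ]
--
--     return check_digits_in_range_without_discards
--
-- def get_most_common_check_digits_in_range(pin: int, pin_range: int) -> Set[int]:
--     check_digits = get_check_digits_in_range(pin, pin_range)
--     check_digit_occurance_pairs = Counter(check_digits).most_common()
--
--     largest_occurance = 0
--     most_common_digits = set()
--
--     for check_digit, occurance in check_digit_occurance_pairs:
--         if occurance >= largest_occurance:
--             largest_occurance = occurance
--             most_common_digits.add(check_digit)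
--
--     return most_common_digits
-- ===== SOURCE B (Python) =====
-- def get_check_digit(pin: int) -> int:
--     n = pin
--     while True:
--         s = sum(int(d) * (i + 2) for i, d in enumerate(str(n)[::-1]))
--         if s == 17:
--             return -1
--         if s % 123 < 10:
--             return s % 123
--         n = s
--
-- def get_most_common_check_digits_in_range(pin: int, pin_range: int):
--     counts = {}
--     for n in range(pin_range + 1):
--         d = get_check_digit(pin + n)
--         if d != -1:
--             counts[d] = counts.get(d, 0) + 1
--     if not counts:
--         return set()
--     m = max(counts.values())
--     return {d for d, c in counts.items() if c == m}
-- ===== Notes on version B (the rewrite author's own statement) =====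
-- stated objective: simpler
-- what changed: B replaces A's recursive check-digit helper by a while-loop and replaces the intermediate list building, Counter.most_common sort and the largest/accumulator scan by a single counting pass over the range followed by a direct max-count filter over the count dict (empty set returned when every pin is discarded).
import Mathlib
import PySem

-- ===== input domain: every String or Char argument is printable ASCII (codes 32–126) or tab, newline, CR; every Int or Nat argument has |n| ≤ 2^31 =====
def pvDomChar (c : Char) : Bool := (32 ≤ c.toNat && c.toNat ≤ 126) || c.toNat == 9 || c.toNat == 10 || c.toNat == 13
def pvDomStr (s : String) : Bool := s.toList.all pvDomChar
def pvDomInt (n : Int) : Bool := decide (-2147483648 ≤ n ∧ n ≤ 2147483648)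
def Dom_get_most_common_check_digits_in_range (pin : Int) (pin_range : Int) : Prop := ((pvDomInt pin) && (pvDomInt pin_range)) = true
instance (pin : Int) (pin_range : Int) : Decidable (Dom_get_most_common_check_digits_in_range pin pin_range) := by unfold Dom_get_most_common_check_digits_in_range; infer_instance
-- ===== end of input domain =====

-- B replaces A's recursive helper, intermediate lists, most_common sort and accumulator scan by a
-- while-loop, one counting pass over the range and a direct max-count filter (objective: simpler).

-- ===== PORT A =====
-- sum(int(val) * (i + 2) for i, val in enumerate(list(str(pin))[::-1])) — this exact expression
-- appears verbatim in A and in B, so both ports share this one helper; the '.getD' guards sit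
-- where Python would raise (int('-') on a negative pin — excluded by Pre_; slice step -1 ≠ 0 never fails)
def pvSumProducts (pin : Int) : Int :=
  ((PySem.List.enumerate ((PySem.List.slice? (PySem.Int.toChars pin) none none (-1)).getD [])).map
    (fun p => ((PySem.Int.ofStr? (String.ofList [p.2])).getD 0) * (p.1 + 2))).sum

-- get_check_digit (recursive, as in A); the Nat fuel only makes the Python recursion structural
-- (its depth is at most 7 on the domain: the sum of products of a value ≤ 2^32 is ≤ 585)
def pvCheckA : Nat → Int → Int
  | 0, _ => 0
  | fuel+1, pin =>
    let sum_of_products := pvSumProducts pin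
    if sum_of_products = 17 then -1
    else
      let check_digit := PySem.Int.mod sum_of_products 123
      if check_digit < 10 then check_digit else pvCheckA fuel sum_of_products

-- get_check_digits_in_range
def pvCheckDigitsA (pin pin_range : Int) : List Int :=
  ((PySem.List.pyRange 0 (pin_range + 1) 1).map (fun n => pvCheckA 64 (pin + n))).filter
    (fun n => n != -1)

def get_most_common_check_digits_in_range (pin : Int) (pin_range : Int) : List Int :=
  ((PySem.List.sorted (PySem.Dict.counter (pvCheckDigitsA pin pin_range)).items
      (fun p => p.2) true).foldl
    (fun st p => if st.1 ≤ p.2 then (p.2, PySem.Set.add st.2 p.1) else st)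
    ((0 : Int), (PySem.Set.empty : PySem.Set Int))).2

-- ===== PORT B =====
-- get_check_digit as B's 'while True' loop (same fuel guard as A's port)
def pvCheckB : Nat → Int → Int
  | 0, _ => 0
  | fuel+1, n =>
    let s := pvSumProducts n
    if s = 17 then -1
    else if PySem.Int.mod s 123 < 10 then PySem.Int.mod s 123
    else pvCheckB fuel s

-- the counting loop of B
def pvCountsB (pin pin_range : Int) : PySem.Dict Int Int :=
  (PySem.List.pyRange 0 (pin_range + 1) 1).foldl
    (fun d n =>
      let c := pvCheckB 64 (pin + n)
      if c != -1 then d.insert c (d.getD c 0 + 1) else d)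
    PySem.Dict.empty

def get_most_common_check_digits_in_range_alt (pin : Int) (pin_range : Int) : List Int :=
  if (pvCountsB pin pin_range).items = [] then []
  else
    match PySem.List.max? (pvCountsB pin pin_range).values (fun v => v) with
    | none => []   -- unreachable: the dict is non-empty here, so values has a max
    | some m =>
        PySem.Set.ofList
          (((pvCountsB pin pin_range).items.filter (fun p => p.2 == m)).map (fun p => p.1))

-- ===== PRECONDITION & SPEC =====
-- Pre_ excludes exactly the inputs where Python A raises: a non-empty range starting at a negative
-- pin makes int('-') raise ValueError inside get_check_digit.
def Pre_get_most_common_check_digits_in_range (pin : Int) (pin_range : Int) : Prop :=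
  pin_range < 0 ∨ 0 ≤ pin
instance (pin : Int) (pin_range : Int) : Decidable (Pre_get_most_common_check_digits_in_range pin pin_range) := by unfold Pre_get_most_common_check_digits_in_range; infer_instance

def pvWitness_get_most_common_check_digits_in_range : Int × Int := (0, 5)

def Spec_get_most_common_check_digits_in_range (pin : Int) (pin_range : Int) (out : List Int) : Prop := out = get_most_common_check_digits_in_range_alt pin pin_range
instance (pin : Int) (pin_range : Int) (out : List Int) : Decidable (Spec_get_most_common_check_digits_in_range pin pin_range out) := by unfold Spec_get_most_common_check_digits_in_range; infer_instance

-- ===== CLAIM =====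
def Claim_equal_get_most_common_check_digits_in_range : Prop := ∀ (pin : Int) (pin_range : Int), Dom_get_most_common_check_digits_in_range pin pin_range → Pre_get_most_common_check_digits_in_range pin pin_range → Spec_get_most_common_check_digits_in_range pin pin_range (get_most_common_check_digits_in_range pin pin_range)

-- ===== LEMMAS AND PROOFS =====

theorem pvCheck_eq (fuel : Nat) : ∀ n : Int, pvCheckB fuel n = pvCheckA fuel n := by
  induction fuel with
  | zero => intro n; rfl
  | succ f ih =>
      intro n
      simp only [pvCheckB, pvCheckA, ih]

-- B's counting loop equals Counter of A's filtered check-digit list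
theorem pvFoldIf (xs : List Int) (d : PySem.Dict Int Int) :
    xs.foldl (fun d c => if c != -1 then d.insert c (d.getD c 0 + 1) else d) d
      = (xs.filter (fun c => c != -1)).foldl (fun d c => d.insert c (d.getD c 0 + 1)) d := by
  induction xs generalizing d with
  | nil => rfl
  | cons c xs ih =>
      rw [List.foldl_cons, List.filter_cons]
      by_cases h : c = -1
      · have hb : (c != -1) = false := by simp [h]
        rw [hb]
        simpa using ih d
      · have hb : (c != -1) = true := by simp [h]
        rw [hb]
        simp only [if_true, List.foldl_cons]
        exact ih _

theorem pvFoldLet (l : List Int) (pin : Int) (d : PySem.Dict Int Int) :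
    l.foldl (fun d n =>
        let c := pvCheckB 64 (pin + n)
        if c != -1 then d.insert c (d.getD c 0 + 1) else d) d
      = (l.map (fun n => pvCheckB 64 (pin + n))).foldl
          (fun d c => if c != -1 then d.insert c (d.getD c 0 + 1) else d) d := by
  induction l generalizing d with
  | nil => rfl
  | cons n l ih => simp only [List.foldl_cons, List.map_cons]; exact ih _

theorem pvCounts_eq (pin pin_range : Int) :
    pvCountsB pin pin_range = PySem.Dict.counter (pvCheckDigitsA pin pin_range) := by
  unfold pvCountsB
  rw [pvFoldLet, pvFoldIf, PySem.Dict.foldl_insert_getD_add_one_eq_counter]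
  unfold pvCheckDigitsA
  simp only [pvCheck_eq]

-- max? of a non-empty list is some
theorem pvMaxAux (f : Option Int → Int → Option Int)
    (hf : ∀ a x, ∃ y, f (some a) x = some y) :
    ∀ (t : List Int) (a : Int), ∃ m, t.foldl f (some a) = some m := by
  intro t
  induction t with
  | nil => intro a; exact ⟨a, rfl⟩
  | cons y t ih =>
      intro a
      obtain ⟨z, hz⟩ := hf a y
      rw [List.foldl_cons, hz]
      exact ih z

theorem pvMaxSome (xs : List Int) (h : xs ≠ []) :
    ∃ m, PySem.List.max? xs (fun v => v) = some m := by
  cases xs with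
  | nil => exact absurd rfl h
  | cons x t =>
      unfold PySem.List.max?
      rw [List.foldl_cons]
      exact pvMaxAux _
        (fun a y => ⟨if (a : Int) < y then y else a, by by_cases hh : (a : Int) < y <;> simp [hh]⟩)
        t x

-- Set.ofList of a duplicate-free list is the list itself
theorem pvOfListAux (xs : List Int) : ∀ acc : List Int, xs.Nodup → (∀ x ∈ xs, x ∉ acc) →
    xs.foldl PySem.Set.add acc = acc ++ xs := by
  induction xs with
  | nil => intro acc _ _; simp
  | cons x xs ih =>
      intro acc hnd hfr
      have hx : x ∉ acc := hfr x (by simp)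
      have hadd : PySem.Set.add acc x = acc ++ [x] := by
        simp [PySem.Set.add, PySem.Set.contains, hx]
      rw [List.foldl_cons, hadd, ih (acc ++ [x]) hnd.of_cons]
      · simp
      · intro y hy
        simp only [List.mem_append, List.mem_singleton]
        rintro (h | rfl)
        · exact hfr y (by simp [hy]) h
        · exact (List.nodup_cons.mp hnd).1 hy
theorem pvOfList_nodup (xs : List Int) (h : xs.Nodup) : PySem.Set.ofList xs = xs := by
  rw [PySem.Set.ofList_eq_foldl, pvOfListAux xs [] h (by simp)]; rfl

-- stability: inserting below the max keeps the max-count subsequence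
theorem pvInsertFilter (M : Int) (x : Int × Int) (ys : List (Int × Int))
    (hys : ys.Pairwise (fun a b => b.2 ≤ a.2)) (hx : x.2 ≤ M) :
    (PySem.List.insertBy (fun a b => decide (b.2 < a.2)) x ys).filter (fun p => p.2 == M)
      = ys.filter (fun p => p.2 == M) ++ (if x.2 == M then [x] else []) := by
  induction ys with
  | nil => by_cases hxm : x.2 = M <;> simp [PySem.List.insertBy, hxm]
  | cons y ys ih =>
      by_cases h : y.2 < x.2
      · have hlt : ∀ p ∈ y :: ys, p.2 < M := by
          intro p hp
          rcases List.mem_cons.mp hp with rfl | hp'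
          · omega
          · have := (List.pairwise_cons.mp hys).1 p hp'; omega
        have hfil : (y :: ys).filter (fun p => p.2 == M) = [] := by
          rw [List.filter_eq_nil_iff]
          intro p hp
          have := hlt p hp
          simp only [beq_iff_eq]
          omega
        have hins : PySem.List.insertBy (fun a b => decide (b.2 < a.2)) x (y :: ys)
            = x :: y :: ys := by
          simp [PySem.List.insertBy, h]
        rw [hins, List.filter_cons, hfil]
        by_cases hxm : x.2 = M <;> simp [hxm]
      · have hins : PySem.List.insertBy (fun a b => decide (b.2 < a.2)) x (y :: ys)
            = y :: PySem.List.insertBy (fun a b => decide (b.2 < a.2)) x ys := by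
          simp [PySem.List.insertBy, h]
        rw [hins, List.filter_cons, ih (List.Pairwise.of_cons hys), List.filter_cons]
        by_cases hym : y.2 = M <;> simp [hym]

-- insertBy keeps the list sorted (descending by count)
theorem pvInsertPairwise (x : Int × Int) (ys : List (Int × Int))
    (hys : ys.Pairwise (fun a b => b.2 ≤ a.2)) :
    (PySem.List.insertBy (fun a b => decide (b.2 < a.2)) x ys).Pairwise
      (fun a b => b.2 ≤ a.2) := by
  induction ys with
  | nil => simp [PySem.List.insertBy]
  | cons y ys ih =>
      by_cases h : y.2 < x.2
      · simp only [PySem.List.insertBy, h, decide_true, if_true]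
        refine List.pairwise_cons.mpr ⟨?_, hys⟩
        intro p hp
        rcases List.mem_cons.mp hp with rfl | hp
        · omega
        · have := (List.pairwise_cons.mp hys).1 p hp; omega
      · simp only [PySem.List.insertBy, h, decide_false]
        refine List.pairwise_cons.mpr ⟨?_, ih (List.Pairwise.of_cons hys)⟩
        intro p hp
        rcases (PySem.List.mem_insertBy _ x p ys).mp hp with rfl | hp
        · omega
        · exact (List.pairwise_cons.mp hys).1 p hp

theorem pvSortFilterAux (M : Int) (l : List (Int × Int)) : ∀ acc : List (Int × Int),
    acc.Pairwise (fun a b => b.2 ≤ a.2) → (∀ p ∈ l, p.2 ≤ M) →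
    ((l.foldl (fun acc x => PySem.List.insertBy (fun a b => decide (b.2 < a.2)) x acc) acc).filter
        (fun p => p.2 == M))
      = acc.filter (fun p => p.2 == M) ++ l.filter (fun p => p.2 == M) := by
  induction l with
  | nil => intro acc _ _; simp
  | cons x l ih =>
      intro acc hacc hle
      rw [List.foldl_cons,
        ih _ (pvInsertPairwise x acc hacc) (fun p hp => hle p (by simp [hp])),
        pvInsertFilter M x acc hacc (hle x (by simp)), List.filter_cons]
      by_cases hxm : x.2 = M <;> simp [hxm]

-- the sorted list has the same max-count elements, in the same order, as the original
theorem pvSortFilter (M : Int) (l : List (Int × Int)) (hle : ∀ p ∈ l, p.2 ≤ M) :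
    (PySem.List.sorted l (fun p => p.2) true).filter (fun p => p.2 == M)
      = l.filter (fun p => p.2 == M) := by
  rw [PySem.List.sorted_rev_eq_foldl_insertBy, pvSortFilterAux M l [] (by simp) hle]
  rfl

-- A's accumulator loop, after the first element fixed the maximum
theorem pvFoldTail (M : Int) (t : List (Int × Int)) : ∀ acc : List Int,
    (∀ p ∈ t, p.2 ≤ M) → (∀ p ∈ t, p.1 ∉ acc) → (t.map (fun p => p.1)).Nodup →
    t.foldl (fun st p => if st.1 ≤ p.2 then (p.2, PySem.Set.add st.2 p.1) else st) ((M : Int), acc)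
      = (M, acc ++ (t.filter (fun p => p.2 == M)).map (fun p => p.1)) := by
  induction t with
  | nil => intro acc _ _ _; simp
  | cons p t ih =>
      intro acc hle hfr hnd
      rw [List.map_cons] at hnd
      have hhead : p.1 ∉ t.map (fun p => p.1) := (List.nodup_cons.mp hnd).1
      have htail : (t.map (fun p => p.1)).Nodup := (List.nodup_cons.mp hnd).2
      rw [List.foldl_cons]
      by_cases h : M ≤ p.2
      · have hp2 : p.2 = M := le_antisymm (hle p (by simp)) h
        have hx : p.1 ∉ acc := hfr p (by simp)
        have hadd : PySem.Set.add acc p.1 = acc ++ [p.1] := by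
          simp [PySem.Set.add, PySem.Set.contains, hx]
        have hstep : (if ((M : Int), acc).1 ≤ p.2
              then ((p.2 : Int), PySem.Set.add acc p.1) else (M, acc))
            = ((M : Int), acc ++ [p.1]) := by
          simp [hadd, hp2]
        rw [hstep, ih (acc ++ [p.1]) (fun q hq => hle q (by simp [hq]))
            (fun q hq => by
              simp only [List.mem_append, List.mem_singleton, not_or]
              exact ⟨hfr q (by simp [hq]),
                fun hqp => hhead (hqp ▸ List.mem_map_of_mem hq)⟩)
            htail, List.filter_cons]
        have hb : (p.2 == M) = true := by simp [hp2]
        rw [hb]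
        simp
      · have hb : (p.2 == M) = false := by
          simp only [beq_eq_false_iff_ne, ne_eq]
          omega
        have hstep : (if ((M : Int), acc).1 ≤ p.2
              then ((p.2 : Int), PySem.Set.add acc p.1) else (M, acc))
            = ((M : Int), acc) := by
          simp [h]
        rw [hstep, ih acc (fun q hq => hle q (by simp [hq])) (fun q hq => hfr q (by simp [hq]))
            htail, List.filter_cons, hb]
        simp

-- the whole back end: A's sort + scan equals B's max-count filter, for any list of check digits
theorem pvMain (ys : List Int) :
    ((PySem.List.sorted (PySem.Dict.counter ys).items (fun p => p.2) true).foldl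
        (fun st p => if st.1 ≤ p.2 then (p.2, PySem.Set.add st.2 p.1) else st)
        ((0 : Int), (PySem.Set.empty : PySem.Set Int))).2
      = (if (PySem.Dict.counter ys).items = [] then []
         else match PySem.List.max? (PySem.Dict.counter ys).values (fun v => v) with
           | none => []
           | some m =>
               PySem.Set.ofList
                 (((PySem.Dict.counter ys).items.filter (fun p => p.2 == m)).map
                   (fun p => p.1))) := by
  by_cases hnil : (PySem.Dict.counter ys).items = []
  · have hs0 : PySem.List.sorted (PySem.Dict.counter ys).items (fun p => p.2) true = [] := by
      simp [PySem.List.sorted_eq_nil_iff, hnil]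
    rw [if_pos hnil, hs0]
    simp [PySem.Set.empty]
  · rw [if_neg hnil]
    have hvals : (PySem.Dict.counter ys).values ≠ [] := by
      simp only [PySem.Dict.values]
      intro hcon
      exact hnil (List.map_eq_nil_iff.mp hcon)
    obtain ⟨m, hm⟩ := pvMaxSome _ hvals
    rw [hm]
    -- facts about the items of the counter
    have hfstnd : ((PySem.Dict.counter ys).items.map (fun p => p.1)).Nodup := by
      have := PySem.Dict.nodup_keys_counter ys
      simpa [PySem.Dict.keys] using this
    have hpos : ∀ p ∈ (PySem.Dict.counter ys).items, 1 ≤ p.2 := by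
      intro p hp
      rw [PySem.Dict.items_counter] at hp
      obtain ⟨k, hk, rfl⟩ := List.mem_map.mp hp
      have hky : k ∈ ys := (PySem.Set.mem_ofList ys k).mp hk
      have hc : 0 < ys.count k := List.count_pos_iff.mpr hky
      show (1 : Int) ≤ (ys.count k : Int)
      exact_mod_cast hc
    have hmmax : ∀ p ∈ (PySem.Dict.counter ys).items, p.2 ≤ m := by
      intro p hp
      have hv : p.2 ∈ (PySem.Dict.counter ys).values := by
        simp only [PySem.Dict.values]
        exact List.mem_map_of_mem hp
      exact PySem.List.max?_isMax hm p.2 hv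
    have hmmem : ∃ p ∈ (PySem.Dict.counter ys).items, p.2 = m := by
      have := PySem.List.max?_mem hm
      simp only [PySem.Dict.values, List.mem_map] at this
      obtain ⟨p, hp, hpm⟩ := this
      exact ⟨p, hp, hpm⟩
    -- the sorted list
    have hperm := PySem.List.sorted_perm (PySem.Dict.counter ys).items (fun p => p.2) true
    cases hs : PySem.List.sorted (PySem.Dict.counter ys).items (fun p => p.2) true with
    | nil =>
        exact absurd ((PySem.List.sorted_eq_nil_iff _ _ _).mp hs) hnil
    | cons hd t =>
        have hhd_mem : hd ∈ (PySem.Dict.counter ys).items := hperm.subset (hs ▸ List.mem_cons_self)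
        have hM : ∀ p ∈ (PySem.Dict.counter ys).items, p.2 ≤ hd.2 :=
          PySem.List.key_head_sorted_rev_ge _ _ hs
        have hMm : hd.2 = m := by
          obtain ⟨p, hp, hpm⟩ := hmmem
          exact le_antisymm (hmmax hd hhd_mem) (hpm ▸ hM p hp)
        -- nodup of first components along the sorted order
        have hsnd : ((hd :: t).map (fun p => p.1)).Nodup := by
          have := (hperm.map (fun p => p.1)).nodup_iff.mpr hfstnd
          rwa [hs] at this
        rw [List.map_cons] at hsnd
        have hhd1 : hd.1 ∉ t.map (fun p => p.1) := (List.nodup_cons.mp hsnd).1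
        have htnd : (t.map (fun p => p.1)).Nodup := (List.nodup_cons.mp hsnd).2
        -- run A's loop
        have h01 : (0 : Int) ≤ hd.2 := le_trans (by omega) (hpos hd hhd_mem)
        have hstep : (if ((0 : Int), (PySem.Set.empty : PySem.Set Int)).1 ≤ hd.2
              then ((hd.2 : Int), PySem.Set.add PySem.Set.empty hd.1)
              else ((0 : Int), PySem.Set.empty))
            = ((hd.2 : Int), ([hd.1] : List Int)) := by
          simp [h01, PySem.Set.add, PySem.Set.contains, PySem.Set.empty]
        rw [List.foldl_cons, hstep,
          pvFoldTail hd.2 t [hd.1]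
            (fun p hp => hM p (hperm.subset (hs ▸ List.mem_cons_of_mem hd hp)))
            (fun p hp => by
              simp only [List.mem_singleton]
              exact fun hc => hhd1 (hc ▸ List.mem_map_of_mem hp))
            htnd]
    -- identify the filtered lists
        dsimp only
        have hfilter : (PySem.Dict.counter ys).items.filter (fun p => p.2 == m)
            = hd :: t.filter (fun p => p.2 == hd.2) := by
          rw [← hMm, ← pvSortFilter hd.2 (PySem.Dict.counter ys).items hM, hs, List.filter_cons]
          simp
        rw [hfilter, List.map_cons]
        have hnodup : (hd.1 :: (t.filter (fun p => p.2 == hd.2)).map (fun p => p.1)).Nodup := by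
          refine List.nodup_cons.mpr ⟨?_, ?_⟩
          · intro hc
            obtain ⟨p, hp, hpc⟩ := List.mem_map.mp hc
            have hpt : p ∈ t := List.filter_sublist.subset hp
            exact hhd1 (hpc ▸ List.mem_map_of_mem hpt)

          · exact htnd.sublist
              (List.Sublist.map (fun p : Int × Int => p.1)
                (List.filter_sublist (p := fun p => p.2 == hd.2) (l := t)))
        rw [pvOfList_nodup _ hnodup]
        simp

-- ===== VERDICT =====
theorem get_most_common_check_digits_in_range_spec :
    Claim_equal_get_most_common_check_digits_in_range := by
  intro pin pin_range _ _
  unfold Spec_get_most_common_check_digits_in_range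
  unfold get_most_common_check_digits_in_range get_most_common_check_digits_in_range_alt
  rw [pvCounts_eq]
  exact pvMain (pvCheckDigitsA pin pin_range)
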